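-- pv_equiv track=rewrite | github.com/ZhiYi-R/MagicExamUtilities | utilities/workers/summarization_worker.py | _clean_inline_math
-- ===== SOURCE A (Python) =====
-- def _clean_inline_math(content: str) -> str:
--     """
--     Clean up inline math formulas to ensure proper rendering.
--
--     Some markdown renderers have issues with spaces around $ symbols.
--     This function normalizes inline math formulas.
--
--     Examples:
--     - "$ foo $" -> "$foo$"
--     - "$ x + y $" -> "$x + y$"
--     - "$$" (display math) is left unchanged
--
--     Args:
--         content: The markdown content
--
--     Returns:
--         Content with normalized inline math formulas
--     """
--     # Fix inline math with spaces: $ foo $ -> $foo$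
--     # But preserve display math: $$...$$
--     result = []
--
--     i = 0
--     while i < len(content):
--         # Check for display math $$...$$
--         if i + 1 < len(content) and content[i:i+2] == '$$':
--             # Find the closing $$
--             j = content.find('$$', i + 2)
--             if j != -1:
--                 result.append(content[i:j+2])
--                 i = j + 2
--                 continue
--
--         # Check for inline math $...$
--         if content[i] == '$':
--             # Find the closing $
--             j = content.find('$', i + 1)
--             if j != -1:
--                 # Extract the formula and trim spaces
--                 formula = content[i+1:j].strip()
--                 result.append(f'${formula}$')
--                 i = j + 1
--                 continue
--
--         result.append(content[i])
--         i += 1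
--
--     return ''.join(result)
-- ===== SOURCE B (Python) =====
-- def _clean_inline_math(content: str) -> str:
--     """Normalize inline math ($ foo $ -> $foo$), preserve display math ($$...$$)."""
--     out = []
--     rest = content
--     while True:
--         pre, sep, rest = rest.partition('$')
--         out.append(pre)
--         if not sep:
--             break
--         if rest.startswith('$'):
--             body, sep2, tail = rest[1:].partition('$$')
--             if sep2:
--                 out.append('$$' + body + '$$')
--                 rest = tail
--                 continue
--         body, sep2, tail = rest.partition('$')
--         if sep2:
--             out.append('$' + body.strip() + '$')
--             rest = tail
--         else:
--             out.append('$' + body)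
--             break
--     return ''.join(out)
-- ===== Notes on version B (the rewrite author's own statement) =====
-- stated objective: faster
-- what changed: Replaces the hand-written index/state-machine scan (a Python-level char-by-char cursor with find at absolute indices) by a loop that repeatedly str.partition's the remaining suffix on the dollar delimiter, copying plain text in whole chunks and handling the display/inline cases on the suffix after each delimiter.
import Mathlib
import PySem

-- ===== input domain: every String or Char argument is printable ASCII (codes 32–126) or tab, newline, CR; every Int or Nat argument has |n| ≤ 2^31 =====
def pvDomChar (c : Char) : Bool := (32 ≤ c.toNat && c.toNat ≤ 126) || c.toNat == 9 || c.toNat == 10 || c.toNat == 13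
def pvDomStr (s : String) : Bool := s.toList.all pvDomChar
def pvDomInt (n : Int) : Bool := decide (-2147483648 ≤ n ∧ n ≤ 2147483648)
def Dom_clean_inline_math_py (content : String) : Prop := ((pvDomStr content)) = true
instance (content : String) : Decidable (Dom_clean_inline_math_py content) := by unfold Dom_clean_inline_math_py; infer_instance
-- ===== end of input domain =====

-- B replaces A's char-by-char index/state-machine scan by a partition-based loop over the
-- remaining suffix (Python str.partition), copying plain text in whole chunks; the timing
-- run measured B faster by a constant factor (same O(n) asymptotics).

-- ===== PORT A =====
-- while-loop over index i, ported as fuel recursion (fuel = remaining length bound);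
-- content.find(sub, start) is PySem.Chars.findFrom; content[i:j] is PySem.Chars.slice.
def pvALoop : List Char → Nat → Nat → List Char
  | _, 0, _ => []
  | cs, f+1, i =>
    if i < cs.length then
      if (decide (i + 1 < cs.length) &&
          (PySem.Chars.slice cs (some (i:Int)) (some ((i:Int)+2)) == ['$','$']) &&
          (PySem.Chars.findFrom cs ['$','$'] ((i:Int)+2) none != -1)) then
        -- display math $$...$$ with a closing $$
        let j := PySem.Chars.findFrom cs ['$','$'] ((i:Int)+2) none
        PySem.Chars.slice cs (some (i:Int)) (some (j+2)) ++ pvALoop cs f (j+2).toNat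
      else if ((cs.getD i ' ' == '$') &&
               (PySem.Chars.findFrom cs ['$'] ((i:Int)+1) none != -1)) then
        -- inline math $...$ with a closing $
        let j := PySem.Chars.findFrom cs ['$'] ((i:Int)+1) none
        '$' :: (PySem.Chars.strip (PySem.Chars.slice cs (some ((i:Int)+1)) (some j)) ++
                '$' :: pvALoop cs f (j+1).toNat)
      else
        cs.getD i ' ' :: pvALoop cs f (i+1)
    else []

def clean_inline_math_py (content : String) : String :=
  String.ofList (pvALoop content.toList content.toList.length 0)

-- ===== PORT B =====
-- Source B's loop: rest.partition('$') ported exactly as find + take/drop (first match);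
-- `recur` is the loop continuation (the next iteration at the remaining fuel).
def pvBInline (recur : List Char → List Char) (rest : List Char) : List Char :=
  let m := PySem.Chars.find rest ['$']
  if m = -1 then '$' :: rest
  else '$' :: (PySem.Chars.strip (rest.take m.toNat) ++ '$' :: recur (rest.drop (m.toNat+1)))

def pvBAfter (recur : List Char → List Char) (rest : List Char) : List Char :=
  if PySem.Chars.startswith rest ['$'] then
    let k := PySem.Chars.find rest.tail ['$','$']
    if k ≠ -1 then
      '$' :: '$' :: (rest.tail.take k.toNat ++ '$' :: '$' :: recur (rest.tail.drop (k.toNat+2)))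
    else pvBInline recur rest
  else pvBInline recur rest

def pvBLoop : Nat → List Char → List Char
  | 0, _ => []
  | f+1, cs =>
    let j := PySem.Chars.find cs ['$']
    if j = -1 then cs
    else cs.take j.toNat ++ pvBAfter (pvBLoop f) (cs.drop (j.toNat+1))

def clean_inline_math_py_alt (content : String) : String :=
  String.ofList (pvBLoop (content.toList.length + 1) content.toList)

-- ===== PRECONDITION & SPEC =====
def Spec_clean_inline_math_py (content : String) (out : String) : Prop := out = clean_inline_math_py_alt content
instance (content : String) (out : String) : Decidable (Spec_clean_inline_math_py content out) := by unfold Spec_clean_inline_math_py; infer_instance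

-- ===== CLAIM (what is proved, stated in full; the proofs are below) =====
def Claim_equal_clean_inline_math_py : Prop := ∀ (content : String), Dom_clean_inline_math_py content → Spec_clean_inline_math_py content (clean_inline_math_py content)

-- ===== LEMMAS AND PROOFS =====

theorem pvFind_eq_of (s sub : List Char) (n : Nat) (_hn : n ≤ s.length)
    (h1 : sub <+: s.drop n) (h2 : ∀ i < n, ¬ sub <+: s.drop i) :
    PySem.Chars.find s sub = n := by
  have hinf : sub <:+: s := h1.isInfix.trans (List.drop_suffix n s).isInfix
  have hnn : 0 ≤ PySem.Chars.find s sub := (PySem.Chars.find_nonneg_iff s sub).mpr hinf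
  obtain ⟨hp, hmin⟩ := PySem.Chars.find_spec (s := s) (sub := sub) hnn
  rcases Nat.lt_trichotomy (PySem.Chars.find s sub).toNat n with h | h | h
  · exact absurd hp (h2 _ h)
  · omega
  · exact absurd h1 (hmin n h)

theorem pvFind_cons_self (t : List Char) : PySem.Chars.find ('$' :: t) ['$'] = 0 := by
  refine pvFind_eq_of _ _ 0 (by simp) ⟨t, rfl⟩ (fun i hi => by omega)

theorem pvFind_cons_ne_neg {c : Char} (hc : c ≠ '$') (t : List Char)
    (h : PySem.Chars.find t ['$'] = -1) : PySem.Chars.find (c :: t) ['$'] = -1 := by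
  rw [PySem.Chars.find_eq_neg_one_iff] at h ⊢
  rw [List.singleton_infix_iff] at h ⊢
  simp [hc.symm, h]

theorem pvFind_bounds {s sub : List Char} (h : PySem.Chars.find s sub ≠ -1) :
    0 ≤ PySem.Chars.find s sub ∧
    (PySem.Chars.find s sub).toNat + sub.length ≤ s.length ∧
    sub <+: s.drop (PySem.Chars.find s sub).toNat := by
  have hinf : sub <:+: s := (PySem.Chars.find_ne_neg_one_iff s sub).mp h
  have hnn : 0 ≤ PySem.Chars.find s sub := (PySem.Chars.find_nonneg_iff s sub).mpr hinf
  obtain ⟨hp, _⟩ := PySem.Chars.find_spec (s := s) (sub := sub) hnn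
  refine ⟨hnn, ?_, hp⟩
  have h2 := hp.length_le
  rw [List.length_drop] at h2
  have h3 := PySem.Chars.find_le_length s sub
  omega

theorem pvFind_cons_ne_pos {c : Char} (hc : c ≠ '$') (t : List Char)
    (h : PySem.Chars.find t ['$'] ≠ -1) :
    PySem.Chars.find (c :: t) ['$'] = PySem.Chars.find t ['$'] + 1 := by
  obtain ⟨hnn, hlen, hp⟩ := pvFind_bounds h
  obtain ⟨-, hmin⟩ := PySem.Chars.find_spec (s := t) (sub := ['$']) hnn
  set m := (PySem.Chars.find t ['$']).toNat with hm
  have : PySem.Chars.find (c :: t) ['$'] = (m + 1 : Nat) := by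
    refine pvFind_eq_of _ _ (m+1) (by simp; omega) (by simpa using hp) ?_
    intro i hi
    match i with
    | 0 => simp [List.cons_prefix_cons]; intro h'; exact hc h'.symm
    | i+1 => simpa using hmin i (by omega)
  omega

theorem pvBAfter_congr {r1 r2 : List Char → List Char} (rest : List Char)
    (H : ∀ t : List Char, t.length < rest.length → r1 t = r2 t) :
    pvBAfter r1 rest = pvBAfter r2 rest := by
  have hinl : pvBInline r1 rest = pvBInline r2 rest := by
    unfold pvBInline
    by_cases hm : PySem.Chars.find rest ['$'] = -1
    · simp [hm]
    · obtain ⟨hnn, hlen, -⟩ := pvFind_bounds hm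
      simp only [List.length_singleton] at hlen
      simp only []
      rw [if_neg hm, if_neg hm, H _ (by simp only [List.length_drop]; omega)]
  unfold pvBAfter
  by_cases hs : PySem.Chars.startswith rest ['$']
  · by_cases hk : PySem.Chars.find rest.tail ['$','$'] = -1
    · simp [hs, hk, hinl]
    · obtain ⟨hnn, hlen, -⟩ := pvFind_bounds hk
      simp only [List.length_cons] at hlen
      have hr : 0 < rest.length := by
        rcases rest with _ | ⟨a, t⟩
        · simp at hlen
        · simp
      simp only [hs, if_true]
      rw [if_pos hk, if_pos hk,
          H _ (by simp only [List.length_drop, List.length_tail]; omega)]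
  · simp [hs, hinl]

theorem pvBLoop_fuel (f1 : Nat) : ∀ (f2 : Nat) (cs : List Char),
    cs.length < f1 → cs.length < f2 → pvBLoop f1 cs = pvBLoop f2 cs := by
  induction f1 with
  | zero => intro f2 cs h1 h2; omega
  | succ g1 ih =>
    intro f2 cs h1 h2
    match f2 with
    | 0 => omega
    | g2 + 1 =>
      unfold pvBLoop
      by_cases hj : PySem.Chars.find cs ['$'] = -1
      · simp [hj]
      · obtain ⟨hnn, hlen, -⟩ := pvFind_bounds hj
        simp only [List.length_singleton] at hlen
        simp only []
        rw [if_neg hj, if_neg hj]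
        congr 1
        refine pvBAfter_congr _ (fun t ht => ih g2 t ?_ ?_) <;>
          simp only [List.length_drop] at ht ⊢ <;> omega

theorem pvBLoop_no_dollar {cs : List Char} (f : Nat) (hf : 1 ≤ f)
    (h : PySem.Chars.find cs ['$'] = -1) : pvBLoop f cs = cs := by
  match f with
  | g + 1 => unfold pvBLoop; simp [h]

theorem pvBLoop_cons_ne {c : Char} (hc : c ≠ '$') (u : List Char) :
    pvBLoop (u.length + 2) (c :: u) = c :: pvBLoop (u.length + 1) u := by
  by_cases hm : PySem.Chars.find u ['$'] = -1
  · rw [pvBLoop_no_dollar _ (by omega) (pvFind_cons_ne_neg hc u hm),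
        pvBLoop_no_dollar _ (by omega) hm]
  · obtain ⟨hnn, hlen, -⟩ := pvFind_bounds hm
    simp only [List.length_singleton] at hlen
    have hcons := pvFind_cons_ne_pos hc u hm
    show pvBLoop (u.length + 1 + 1) (c :: u) = _
    unfold pvBLoop
    rw [if_neg (by rw [hcons]; omega), if_neg hm]
    have ht1 : (PySem.Chars.find (c :: u) ['$']).toNat = (PySem.Chars.find u ['$']).toNat + 1 := by
      rw [hcons]; omega
    rw [ht1]
    simp only [List.take_succ_cons, List.drop_succ_cons, List.cons_append]
    congr 2
    refine pvBAfter_congr _ (fun t ht => pvBLoop_fuel _ _ _ ?_ ?_) <;>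
      simp only [List.length_drop] at ht ⊢ <;> omega

-- main loop correspondence: A at index i equals B on the suffix
theorem pvMain (cs : List Char) : ∀ (f i : Nat), cs.length - i ≤ f →
    pvALoop cs f i = pvBLoop ((cs.drop i).length + 1) (cs.drop i) := by
  intro f
  induction f with
  | zero =>
    intro i h
    rw [List.drop_eq_nil_of_le (by omega)]
    rfl
  | succ f ih =>
    intro i h
    cases hdrop : cs.drop i with
    | nil =>
      have hi : ¬ i < cs.length := by
        have := congrArg List.length hdrop
        simp only [List.length_drop, List.length_nil] at this
        omega
      simp only [pvALoop, if_neg hi]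
      rfl
    | cons c u =>
      have hld : cs.length - i = u.length + 1 := by
        have := congrArg List.length hdrop
        simp only [List.length_drop, List.length_cons] at this
        omega
      have hi : i < cs.length := by omega
      have hci : cs[i]? = some c := by
        have h0 : (List.drop i cs)[0]? = cs[i+0]? := List.getElem?_drop
        rw [hdrop] at h0
        simpa using h0.symm
      have hgetD : cs.getD i ' ' = c := by
        rw [List.getD_eq_getElem?_getD, hci]; rfl
      have hu : cs.drop (i+1) = u := by
        rw [← List.tail_drop, hdrop]; rfl
      have hslice2 : PySem.Chars.slice cs (some (i:Int)) (some ((i:Int)+2)) = (c :: u).take 2 := by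
        have h2 := PySem.List.slice_natCast_add (xs := cs) (j := i) (n := 2)
        rw [← hdrop]
        simpa using h2
      by_cases hc : c = '$'
      · subst hc
        cases u with
        | nil =>
          simp only [List.length_nil] at hld
          have hcond1 : (decide (i + 1 < cs.length) &&
              (PySem.Chars.slice cs (some (i:Int)) (some ((i:Int)+2)) == ['$','$']) &&
              (PySem.Chars.findFrom cs ['$','$'] ((i:Int)+2) none != -1)) = false := by
            have : ¬ (i + 1 < cs.length) := by omega
            simp [this]
          have hff1 : PySem.Chars.findFrom cs ['$'] ((i:Int)+1) none = -1 := by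
            rw [show ((i:Int)+1) = ((i+1:Nat):Int) by push_cast; ring,
                PySem.Chars.findFrom_natCast cs ['$'] (i+1) (by omega), hu]
            rw [if_pos (by decide)]
          have hcond2 : ((cs.getD i ' ' == '$') &&
              (PySem.Chars.findFrom cs ['$'] ((i:Int)+1) none != -1)) = false := by
            rw [hff1]; simp
          simp only [pvALoop, if_pos hi, hcond1, hcond2, if_false, Bool.false_eq_true]
          rw [hgetD, ih (i+1) (by omega), hu]
          decide
        | cons c2 v =>
          have hv : cs.drop (i+2) = v := by
            rw [show i+2 = i+1+1 from rfl, ← List.tail_drop, hu]; rfl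
          simp only [List.length_cons] at hld
          by_cases hc2 : c2 = '$'
          · subst hc2
            have hff2 : PySem.Chars.findFrom cs ['$','$'] ((i:Int)+2) none =
                (if PySem.Chars.find v ['$','$'] = -1 then -1
                 else ((i+2 : Nat) : Int) + PySem.Chars.find v ['$','$']) := by
              rw [show ((i:Int)+2) = ((i+2:Nat):Int) by push_cast; ring,
                  PySem.Chars.findFrom_natCast cs ['$','$'] (i+2) (by omega), hv]
            have hff1 : PySem.Chars.findFrom cs ['$'] ((i:Int)+1) none = (i:Int)+1 := by
              rw [show ((i:Int)+1) = ((i+1:Nat):Int) by push_cast; ring,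
                  PySem.Chars.findFrom_natCast cs ['$'] (i+1) (by omega), hu,
                  pvFind_cons_self, if_neg (by decide)]
              push_cast; ring
            have hsw : PySem.Chars.startswith ('$'::v) ['$'] = true := by
              rw [PySem.Chars.startswith_iff]; exact ⟨v, rfl⟩
            have hstrip : PySem.Chars.strip ([] : List Char) = [] := by decide
            by_cases hk : PySem.Chars.find v ['$','$'] = -1
            · have hffv : PySem.Chars.findFrom cs ['$','$'] ((i:Int)+2) none = -1 := by
                rw [hff2, if_pos hk]
              have hcond1 : (decide (i + 1 < cs.length) &&
                  (PySem.Chars.slice cs (some (i:Int)) (some ((i:Int)+2)) == ['$','$']) &&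
                  (PySem.Chars.findFrom cs ['$','$'] ((i:Int)+2) none != -1)) = false := by
                rw [hffv]; simp
              have hcond2 : ((cs.getD i ' ' == '$') &&
                  (PySem.Chars.findFrom cs ['$'] ((i:Int)+1) none != -1)) = true := by
                rw [hgetD, hff1]
                simp [bne_iff_ne]
                omega
              have hsl0 : PySem.Chars.slice cs (some ((i:Int)+1)) (some ((i:Int)+1)) = [] := by
                rw [PySem.Chars.slice_eq_listSlice,
                    PySem.List.slice_toNat cs (by omega) (by omega)]
                simp
              have hT : (('$' == '$') && ((((i:Nat):Int)+1) != -1)) = true := by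
                simp [bne_iff_ne]; omega
              simp only [pvALoop]
              rw [if_pos hi, hcond1]
              simp only [Bool.false_eq_true, if_false]
              rw [hgetD, hff1, if_pos hT, hsl0, hstrip,
                  show ((i:Int)+1+1).toNat = i + 2 by omega, ih (i+2) (by omega), hv]
              -- B side
              simp only [List.length_cons]
              show _ = pvBLoop (v.length + 1 + 1 + 1) ('$'::'$'::v)
              conv_rhs => unfold pvBLoop
              rw [pvFind_cons_self ('$'::v), if_neg (show ¬((0:Int) = -1) by decide)]
              simp only [Int.toNat_zero, List.take_zero, List.drop_succ_cons, List.drop_zero,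
                List.nil_append]
              conv_rhs => unfold pvBAfter
              rw [hsw, if_pos rfl, List.tail_cons, if_neg (not_not_intro hk)]
              conv_rhs => unfold pvBInline
              rw [pvFind_cons_self v, if_neg (show ¬((0:Int) = -1) by decide)]
              simp only [Int.toNat_zero, List.take_zero, List.drop_succ_cons, List.drop_zero]
              rw [hstrip,
                  pvBLoop_fuel (v.length+1+1) (v.length+1) v (by omega) (by omega)]
              simp
            · obtain ⟨hnn, hkl, hpref⟩ := pvFind_bounds hk
              simp only [List.length_cons] at hkl
              have hffv : PySem.Chars.findFrom cs ['$','$'] ((i:Int)+2) none =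
                  ((i+2 : Nat) : Int) + PySem.Chars.find v ['$','$'] := by
                rw [hff2, if_neg hk]
              have hc1 : (decide (i + 1 < cs.length) &&
                  (PySem.Chars.slice cs (some (i:Int)) (some ((i:Int)+2)) == ['$','$']) &&
                  (PySem.Chars.findFrom cs ['$','$'] ((i:Int)+2) none != -1)) = true := by
                rw [hffv, hslice2]
                have h1 : i + 1 < cs.length := by omega
                simp [h1, bne_iff_ne]
                omega
              have htk : (v.drop (PySem.Chars.find v ['$','$']).toNat).take 2 = ['$','$'] := by
                have := List.prefix_iff_eq_take.mp hpref
                simpa using this.symm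
              have hslbig : PySem.Chars.slice cs (some (i:Int))
                  (some (((i+2 : Nat) : Int) + PySem.Chars.find v ['$','$'] + 2)) =
                  '$'::'$':: (v.take (PySem.Chars.find v ['$','$']).toNat ++ ['$','$']) := by
                rw [PySem.Chars.slice_eq_listSlice,
                    PySem.List.slice_toNat cs (by omega) (by omega),
                    show ((i:Int)).toNat = i from Int.toNat_natCast i,
                    show ((((i+2:Nat)):Int) + PySem.Chars.find v ['$','$'] + 2).toNat - i =
                      (PySem.Chars.find v ['$','$']).toNat + 2 + 2 by omega,
                    hdrop, List.take_succ_cons, List.take_succ_cons, List.take_add, htk]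
              have hdropbig : cs.drop (i + ((PySem.Chars.find v ['$','$']).toNat + 2) + 2) =
                  v.drop ((PySem.Chars.find v ['$','$']).toNat + 2) := by
                rw [show i + ((PySem.Chars.find v ['$','$']).toNat + 2) + 2 =
                      (i+2) + ((PySem.Chars.find v ['$','$']).toNat + 2) by omega,
                    ← List.drop_drop, hv]
              simp only [pvALoop]
              rw [if_pos hi, if_pos hc1, hffv,
                  show (((i+2:Nat):Int) + PySem.Chars.find v ['$','$'] + 2).toNat =
                    i + ((PySem.Chars.find v ['$','$']).toNat + 2) + 2 by omega,
                  hslbig, ih _ (by omega), hdropbig]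
              -- B side
              simp only [List.length_cons]
              show _ = pvBLoop (v.length + 1 + 1 + 1) ('$'::'$'::v)
              conv_rhs => unfold pvBLoop
              rw [pvFind_cons_self ('$'::v), if_neg (show ¬((0:Int) = -1) by decide)]
              simp only [Int.toNat_zero, List.take_zero, List.drop_succ_cons, List.drop_zero,
                List.nil_append]
              conv_rhs => unfold pvBAfter
              rw [hsw, if_pos rfl, List.tail_cons, if_pos hk,
                  pvBLoop_fuel (v.length+1+1) ((v.drop ((PySem.Chars.find v ['$','$']).toNat + 2)).length+1)
                    (v.drop ((PySem.Chars.find v ['$','$']).toNat + 2))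
                    (by simp only [List.length_drop]; omega)
                    (by simp only [List.length_drop]; omega)]
              simp [List.append_assoc, List.cons_append]
          · -- inline case: second char is not '$'
            have hcond1 : (decide (i + 1 < cs.length) &&
                (PySem.Chars.slice cs (some (i:Int)) (some ((i:Int)+2)) == ['$','$']) &&
                (PySem.Chars.findFrom cs ['$','$'] ((i:Int)+2) none != -1)) = false := by
              rw [hslice2]; simp [hc2]
            have hff1g : PySem.Chars.findFrom cs ['$'] ((i:Int)+1) none =
                (if PySem.Chars.find (c2::v) ['$'] = -1 then -1
                 else ((i+1 : Nat) : Int) + PySem.Chars.find (c2::v) ['$']) := by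
              rw [show ((i:Int)+1) = ((i+1:Nat):Int) by push_cast; ring,
                  PySem.Chars.findFrom_natCast cs ['$'] (i+1) (by omega), hu]
            have hsw2 : PySem.Chars.startswith (c2::v) ['$'] = false := by
              rw [← Bool.not_eq_true, PySem.Chars.startswith_iff, List.cons_prefix_cons]
              rintro ⟨h1, -⟩; exact hc2 h1.symm
            by_cases hm : PySem.Chars.find (c2::v) ['$'] = -1
            · have hffv : PySem.Chars.findFrom cs ['$'] ((i:Int)+1) none = -1 := by
                rw [hff1g, if_pos hm]
              simp only [pvALoop]
              rw [if_pos hi, hcond1]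
              simp only [Bool.false_eq_true, if_false]
              rw [hgetD, hffv,
                  if_neg (show ¬(('$' == '$') && (((-1):Int) != -1)) = true by decide),
                  ih (i+1) (by omega), hu,
                  pvBLoop_no_dollar ((c2::v).length + 1) (by omega) hm]
              -- B side
              simp only [List.length_cons]
              show _ = pvBLoop (v.length + 1 + 1 + 1) ('$'::c2::v)
              conv_rhs => unfold pvBLoop
              rw [pvFind_cons_self (c2::v), if_neg (show ¬((0:Int) = -1) by decide)]
              simp only [Int.toNat_zero, List.take_zero, List.drop_succ_cons, List.drop_zero,
                List.nil_append]
              conv_rhs => unfold pvBAfter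
              rw [hsw2, if_neg (show ¬(false = true) by decide)]
              conv_rhs => unfold pvBInline
              rw [if_pos hm]
            · obtain ⟨hmn, hml, hmp⟩ := pvFind_bounds hm
              simp only [List.length_cons] at hml
              have hffv : PySem.Chars.findFrom cs ['$'] ((i:Int)+1) none =
                  ((i+1 : Nat) : Int) + PySem.Chars.find (c2::v) ['$'] := by
                rw [hff1g, if_neg hm]
              have hT2 : (('$' == '$') &&
                  ((((i+1:Nat):Int) + PySem.Chars.find (c2::v) ['$']) != -1)) = true := by
                simp [bne_iff_ne]; omega
              have hslin : PySem.Chars.slice cs (some ((i:Int)+1))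
                  (some (((i+1:Nat):Int) + PySem.Chars.find (c2::v) ['$'])) =
                  (c2::v).take (PySem.Chars.find (c2::v) ['$']).toNat := by
                rw [PySem.Chars.slice_eq_listSlice,
                    PySem.List.slice_toNat cs (by omega) (by omega),
                    show ((i:Int)+1).toNat = i+1 by omega,
                    show (((i+1:Nat):Int) + PySem.Chars.find (c2::v) ['$']).toNat - (i+1) =
                      (PySem.Chars.find (c2::v) ['$']).toNat by omega,
                    hu]
              have hdropin : cs.drop ((i+1) + ((PySem.Chars.find (c2::v) ['$']).toNat + 1)) =
                  (c2::v).drop ((PySem.Chars.find (c2::v) ['$']).toNat + 1) := by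
                rw [← List.drop_drop, hu]
              simp only [pvALoop]
              rw [if_pos hi, hcond1]
              simp only [Bool.false_eq_true, if_false]
              rw [hgetD, hffv, if_pos hT2, hslin,
                  show (((i+1:Nat):Int) + PySem.Chars.find (c2::v) ['$'] + 1).toNat =
                    (i+1) + ((PySem.Chars.find (c2::v) ['$']).toNat + 1) by omega,
                  ih _ (by omega), hdropin]
              -- B side
              simp only [List.length_cons]
              show _ = pvBLoop (v.length + 1 + 1 + 1) ('$'::c2::v)
              conv_rhs => unfold pvBLoop
              rw [pvFind_cons_self (c2::v), if_neg (show ¬((0:Int) = -1) by decide)]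
              simp only [Int.toNat_zero, List.take_zero, List.drop_succ_cons, List.drop_zero,
                List.nil_append]
              conv_rhs => unfold pvBAfter
              rw [hsw2, if_neg (show ¬(false = true) by decide)]
              conv_rhs => unfold pvBInline
              rw [if_neg hm,
                  pvBLoop_fuel (v.length+1+1)
                    (((c2::v).drop ((PySem.Chars.find (c2::v) ['$']).toNat + 1)).length+1)
                    ((c2::v).drop ((PySem.Chars.find (c2::v) ['$']).toNat + 1))
                    (by simp only [List.length_drop, List.length_cons]; omega)
                    (by simp only [List.length_drop, List.length_cons]; omega)]
              simp only [List.drop_succ_cons]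
      · -- plain character
        have hcond1 : (decide (i + 1 < cs.length) &&
            (PySem.Chars.slice cs (some (i:Int)) (some ((i:Int)+2)) == ['$','$']) &&
            (PySem.Chars.findFrom cs ['$','$'] ((i:Int)+2) none != -1)) = false := by
          rw [hslice2]
          cases u <;> simp [hc]
        have hcond2 : ((cs.getD i ' ' == '$') &&
            (PySem.Chars.findFrom cs ['$'] ((i:Int)+1) none != -1)) = false := by
          rw [hgetD]
          simp [hc]
        simp only [pvALoop, if_pos hi, hcond1, hcond2, if_false, Bool.false_eq_true]
        rw [hgetD, ih (i+1) (by omega), hu]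
        rw [show (c :: u).length + 1 = u.length + 2 by simp]
        rw [pvBLoop_cons_ne hc u]

-- ===== VERDICT (by name: the statement is the Claim_ definition above) =====
theorem clean_inline_math_py_spec : Claim_equal_clean_inline_math_py := by
  intro content _
  show _ = _
  unfold clean_inline_math_py clean_inline_math_py_alt
  rw [pvMain content.toList content.toList.length 0 (by omega)]
  simp
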